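-- pv_equiv track=rewrite | github.com/lilei1/Knowledge_graphs_for_RAG | expand_maize_kg.py | determine_node_type
-- ===== SOURCE A (Python) =====
-- def determine_node_type(entity_name):
--     """Determine the appropriate node label based on entity name patterns"""
--     entity_lower = entity_name.lower()
--
--     # Gene patterns (expanded)
--     if any(pattern in entity_name for pattern in ['DREB', 'Zm', 'PSY', 'VPP', 'NF-Y', 'CCT', 'EREB', 'WRKY', 'MYB', 'HDZ', 'TCP', 'NAC', 'ARF', 'GRF', 'SPL', 'KN', 'GA20ox']):
--         return 'Gene'
--
--     # Trait patterns (expanded)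
--     elif any(trait in entity_lower for trait in ['tolerance', 'yield', 'depth', 'color', 'roots', 'flowering', 'resistance', 'production', 'architecture', 'height', 'senescence', 'development', 'size', 'elongation', 'efficiency', 'protein', 'kernel', 'leaves', 'system', 'lodging', 'rainfall', 'stress']):
--         return 'Trait'
--
--     # Genotype patterns (expanded)
--     elif entity_name in ['B73', 'Mo17', 'CML247', 'W22', 'Oh43', 'PH207', 'Ki3', 'A632', 'Tx303', 'NC350', 'F7', 'B37']:
--         return 'Genotype'
--
--     # QTL patterns
--     elif entity_name.startswith('q') and any(char.isdigit() for char in entity_name):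
--         return 'QTL'
--
--     # Chromosome patterns
--     elif 'chromosome' in entity_lower:
--         return 'Chromosome'
--
--     # Trial patterns
--     elif 'trial' in entity_lower:
--         return 'Trial'
--
--     # Location patterns (expanded)
--     elif entity_name in ['Ames', 'Iowa', 'Nebraska', 'Illinois', 'Kansas', 'Minnesota']:
--         return 'Location'
--
--     # Weather patterns (expanded)
--     elif any(weather in entity_lower for weather in ['drought', 'normal', 'high', 'cold', 'wind', 'rainfall', 'temperature']):
--         return 'Weather'
--
--     # Molecular marker patterns
--     elif entity_name.startswith('SNP_') or entity_name.startswith('SSR_'):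
--         return 'Marker'
--
--     # Pathway patterns
--     elif 'pathway' in entity_lower or 'signaling' in entity_lower or 'biosynthesis' in entity_lower or 'metabolism' in entity_lower or 'response' in entity_lower or 'clock' in entity_lower or 'division' in entity_lower:
--         return 'Pathway'
--
--     # Default to Entity if no pattern matches
--     else:
--         return 'Entity'
-- ===== SOURCE B (Python) =====
-- # B: multi-pattern matching by position — enumerate each start position once and hash the
-- # few fixed-length substrings into pattern->priority dicts, then return the label of the
-- # MINIMUM priority found (exhaustive scoring + min instead of A's ordered elif chain of
-- # per-pattern 'in' scans).  Priorities follow A's branch order, so min = first match.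
-- _GENE = ['DREB', 'Zm', 'PSY', 'VPP', 'NF-Y', 'CCT', 'EREB', 'WRKY', 'MYB', 'HDZ', 'TCP', 'NAC', 'ARF', 'GRF', 'SPL', 'KN', 'GA20ox']
-- _TRAIT = ['tolerance', 'yield', 'depth', 'color', 'roots', 'flowering', 'resistance', 'production', 'architecture', 'height', 'senescence', 'development', 'size', 'elongation', 'efficiency', 'protein', 'kernel', 'leaves', 'system', 'lodging', 'rainfall', 'stress']
-- _GENOTYPE = ['B73', 'Mo17', 'CML247', 'W22', 'Oh43', 'PH207', 'Ki3', 'A632', 'Tx303', 'NC350', 'F7', 'B37']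
-- _LOCATION = ['Ames', 'Iowa', 'Nebraska', 'Illinois', 'Kansas', 'Minnesota']
-- _WEATHER = ['drought', 'normal', 'high', 'cold', 'wind', 'rainfall', 'temperature']
-- _PATHWAY = ['pathway', 'signaling', 'biosynthesis', 'metabolism', 'response', 'clock', 'division']
--
-- # case-sensitive substring patterns (looked up in the original string)
-- _CASED = {p: 0 for p in _GENE}
-- # lowercase substring patterns (looked up in the lowercased string); a pattern appearing in
-- # two categories ('rainfall') keeps its LOWEST priority, which is what min would pick anyway
-- _LOWER = {}
-- for _pats, _prio in [(_TRAIT, 1), (['chromosome'], 4), (['trial'], 5), (_WEATHER, 7), (_PATHWAY, 9)]: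
--     for _p in _pats:
--         if _p not in _LOWER:
--             _LOWER[_p] = _prio
-- # whole-name patterns
-- _EXACT = {}
-- for _pats, _prio in [(_GENOTYPE, 2), (_LOCATION, 6)]:
--     for _p in _pats:
--         _EXACT[_p] = _prio
-- _CLENS = sorted({len(p) for p in _CASED})
-- _LLENS = sorted({len(p) for p in _LOWER})
-- _LABELS = {0: 'Gene', 1: 'Trait', 2: 'Genotype', 3: 'QTL', 4: 'Chromosome', 5: 'Trial',
--            6: 'Location', 7: 'Weather', 8: 'Marker', 9: 'Pathway'}
--
--
-- def determine_node_type(entity_name):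
--     s = entity_name
--     sl = s.lower()
--     best = None
--     for i in range(len(s)):
--         for L in _CLENS:
--             p = _CASED.get(s[i:i + L])
--             if p is not None:
--                 best = p if best is None else min(best, p)
--         for L in _LLENS:
--             p = _LOWER.get(sl[i:i + L])
--             if p is not None:
--                 best = p if best is None else min(best, p)
--     p = _EXACT.get(s)
--     if p is not None:
--         best = p if best is None else min(best, p)
--     if s.startswith('q') and any(c.isdigit() for c in s):
--         best = 3 if best is None else min(best, 3)
--     if s.startswith('SNP_') or s.startswith('SSR_'):
--         best = 8 if best is None else min(best, 8)
--     if best is None: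
--         return 'Entity'
--     return _LABELS[best]
-- ===== Notes on version B (the rewrite author's own statement) =====
-- stated objective: alternative
-- what changed: Inverts the matching: instead of A's ordered elif chain of per-pattern substring scans, B walks the name once per start position, hashes the few fixed-length substrings into pattern-to-priority dicts, collects exact-name and prefix rule hits the same way, and returns the label of the minimum priority found (exhaustive scoring plus min replaces ordered short-circuit).
import Mathlib
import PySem

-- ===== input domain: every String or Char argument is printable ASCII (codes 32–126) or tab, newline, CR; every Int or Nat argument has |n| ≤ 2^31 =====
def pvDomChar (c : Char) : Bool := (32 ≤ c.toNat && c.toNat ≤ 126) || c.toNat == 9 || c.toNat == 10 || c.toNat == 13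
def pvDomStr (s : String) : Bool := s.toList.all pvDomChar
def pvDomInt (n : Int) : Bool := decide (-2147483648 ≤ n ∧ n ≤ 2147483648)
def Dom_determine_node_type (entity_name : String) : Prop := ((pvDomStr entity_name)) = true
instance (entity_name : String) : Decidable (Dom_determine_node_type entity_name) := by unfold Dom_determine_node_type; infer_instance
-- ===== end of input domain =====

-- B inverts the matching: one scan over start positions hashing fixed-length substrings into
-- pattern→priority dicts, then the label of the minimum priority found (exhaustive scoring + min),
-- instead of A's ordered elif chain of per-pattern containment tests.

-- shared literal pattern lists (the same module-level data both programs carry)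
def pvGene : List String := ["DREB", "Zm", "PSY", "VPP", "NF-Y", "CCT", "EREB", "WRKY", "MYB", "HDZ", "TCP", "NAC", "ARF", "GRF", "SPL", "KN", "GA20ox"]
def pvTrait : List String := ["tolerance", "yield", "depth", "color", "roots", "flowering", "resistance", "production", "architecture", "height", "senescence", "development", "size", "elongation", "efficiency", "protein", "kernel", "leaves", "system", "lodging", "rainfall", "stress"]
def pvGenotype : List String := ["B73", "Mo17", "CML247", "W22", "Oh43", "PH207", "Ki3", "A632", "Tx303", "NC350", "F7", "B37"]
def pvLocation : List String := ["Ames", "Iowa", "Nebraska", "Illinois", "Kansas", "Minnesota"]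
def pvWeather : List String := ["drought", "normal", "high", "cold", "wind", "rainfall", "temperature"]
def pvPathway : List String := ["pathway", "signaling", "biosynthesis", "metabolism", "response", "clock", "division"]

-- ===== PORT A =====
def determine_node_type (entity_name : String) : String :=
  let entity_lower := PySem.Str.lower entity_name
  if pvGene.any (fun pattern => PySem.Str.isIn pattern entity_name) then "Gene"
  else if pvTrait.any (fun trait => PySem.Str.isIn trait entity_lower) then "Trait"
  else if pvGenotype.contains entity_name then "Genotype"
  else if PySem.Str.startswith entity_name "q" && entity_name.toList.any PySem.Chars.isdigit then "QTL"
  else if PySem.Str.isIn "chromosome" entity_lower then "Chromosome"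
  else if PySem.Str.isIn "trial" entity_lower then "Trial"
  else if pvLocation.contains entity_name then "Location"
  else if pvWeather.any (fun weather => PySem.Str.isIn weather entity_lower) then "Weather"
  else if PySem.Str.startswith entity_name "SNP_" || PySem.Str.startswith entity_name "SSR_" then "Marker"
  else if PySem.Str.isIn "pathway" entity_lower || PySem.Str.isIn "signaling" entity_lower || PySem.Str.isIn "biosynthesis" entity_lower || PySem.Str.isIn "metabolism" entity_lower || PySem.Str.isIn "response" entity_lower || PySem.Str.isIn "clock" entity_lower || PySem.Str.isIn "division" entity_lower then "Pathway"
  else "Entity"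

-- ===== PORT B =====
-- _CASED = {p: 0 for p in _GENE}
def pvCased : PySem.Dict String Int := pvGene.foldl (fun d p => d.insert p 0) PySem.Dict.empty
-- _LOWER built staged, first (lowest) priority kept for a duplicate pattern ('rainfall')
def pvLower : PySem.Dict String Int :=
  ([(pvTrait, 1), (["chromosome"], 4), (["trial"], 5), (pvWeather, 7), (pvPathway, 9)] : List (List String × Int)).foldl
    (fun d pr => pr.1.foldl (fun d p => if d.contains p then d else d.insert p pr.2) d) PySem.Dict.empty
-- _EXACT
def pvExact : PySem.Dict String Int :=
  ([(pvGenotype, 2), (pvLocation, 6)] : List (List String × Int)).foldl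
    (fun d pr => pr.1.foldl (fun d p => d.insert p pr.2) d) PySem.Dict.empty
-- _CLENS / _LLENS = sorted({len(p) for p in dict})
def pvCLens : List Int := PySem.List.sorted (PySem.Set.ofList (pvCased.keys.map (fun p => (PySem.Str.len p : Int)))) (fun x => x) false
def pvLLens : List Int := PySem.List.sorted (PySem.Set.ofList (pvLower.keys.map (fun p => (PySem.Str.len p : Int)))) (fun x => x) false
def pvLabels : PySem.Dict Int String :=
  PySem.Dict.ofList [(0, "Gene"), (1, "Trait"), (2, "Genotype"), (3, "QTL"), (4, "Chromosome"), (5, "Trial"), (6, "Location"), (7, "Weather"), (8, "Marker"), (9, "Pathway")]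

-- best = p if best is None else min(best, p)   (the None-propagating min update)
def pvUpd (best : Option Int) (p? : Option Int) : Option Int :=
  match p? with
  | none => best
  | some p => match best with
    | none => some p
    | some b => some (min b p)

def determine_node_type_alt (entity_name : String) : String :=
  let s := entity_name
  let sl := PySem.Str.lower s
  let best :=
    (PySem.List.pyRange 0 (PySem.Str.len s) 1).foldl (fun best i =>
      let best := pvCLens.foldl (fun b L => pvUpd b (pvCased.get? (PySem.Str.slice s (some i) (some (i + L))))) best
      pvLLens.foldl (fun b L => pvUpd b (pvLower.get? (PySem.Str.slice sl (some i) (some (i + L))))) best) none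
  let best := pvUpd best (pvExact.get? s)
  let best := if PySem.Str.startswith s "q" && s.toList.any PySem.Chars.isdigit then pvUpd best (some 3) else best
  let best := if PySem.Str.startswith s "SNP_" || PySem.Str.startswith s "SSR_" then pvUpd best (some 8) else best
  match best with
  | none => "Entity"
  | some p => pvLabels.getD p "Entity"   -- _LABELS[best]; best is always a key (0..9), so the lookup is total

-- ===== PRECONDITION & SPEC =====
def Spec_determine_node_type (entity_name : String) (out : String) : Prop := out = determine_node_type_alt entity_name
instance (entity_name : String) (out : String) : Decidable (Spec_determine_node_type entity_name out) := by unfold Spec_determine_node_type; infer_instance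

-- ===== CLAIM (what is proved, stated in full; the proofs are below) =====
def Claim_equal_determine_node_type : Prop := ∀ (entity_name : String), Dom_determine_node_type entity_name → Spec_determine_node_type entity_name (determine_node_type entity_name)


-- ===== LEMMAS AND PROOFS =====

def omin (l : List (Option Int)) : Option Int := l.foldl pvUpd none

theorem pvUpd_none_left (p? : Option Int) : pvUpd none p? = p? := by cases p? <;> rfl

theorem pvUpd_assoc (a b c : Option Int) : pvUpd (pvUpd a b) c = pvUpd a (pvUpd b c) := by
  cases a <;> cases b <;> cases c <;> simp [pvUpd, min_assoc]

theorem foldl_pvUpd (xs : List (Option Int)) : ∀ init, xs.foldl pvUpd init = pvUpd init (omin xs) := by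
  induction xs with
  | nil => intro init; rfl
  | cons a xs ih =>
    intro init
    have homin : omin (a :: xs) = pvUpd a (omin xs) := by
      show (a :: xs).foldl pvUpd none = _
      rw [List.foldl_cons, pvUpd_none_left, ih a]
    rw [homin, List.foldl_cons, ih (pvUpd init a), pvUpd_assoc]

theorem omin_cons (a : Option Int) (xs : List (Option Int)) : omin (a :: xs) = pvUpd a (omin xs) := by
  show (a :: xs).foldl pvUpd none = _
  rw [List.foldl_cons, pvUpd_none_left, foldl_pvUpd]

theorem omin_append (l1 l2 : List (Option Int)) : omin (l1 ++ l2) = pvUpd (omin l1) (omin l2) := by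
  show (l1 ++ l2).foldl pvUpd none = _
  rw [List.foldl_append, foldl_pvUpd]
  rfl

theorem omin_singleton (x : Option Int) : omin [x] = x := by
  show [x].foldl pvUpd none = x
  simp [pvUpd_none_left]

theorem foldl_pvUpd_f {α : Type} (f : α → Option Int) (xs : List α) (init : Option Int) :
    xs.foldl (fun b x => pvUpd b (f x)) init = pvUpd init (omin (xs.map f)) := by
  rw [← List.foldl_map, foldl_pvUpd]

theorem omin_flatMap {α : Type} (g : α → List (Option Int)) (xs : List α) :
    omin (xs.flatMap g) = omin (xs.map (fun x => omin (g x))) := by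
  induction xs with
  | nil => rfl
  | cons a xs ih => simp only [List.flatMap_cons, List.map_cons, omin_append, omin_cons, ih]

theorem omin_mem : ∀ (l : List (Option Int)) (p : Int), omin l = some p → some p ∈ l := by
  intro l
  induction l with
  | nil => intro p h; exact absurd h (by simp [omin])
  | cons a l ih =>
    intro p h
    rw [omin_cons] at h
    cases a with
    | none =>
      rw [pvUpd_none_left] at h
      exact List.mem_cons_of_mem _ (ih p h)
    | some b =>
      cases hl : omin l with
      | none =>
        rw [hl] at h
        simp only [pvUpd] at h
        exact List.mem_cons.mpr (Or.inl h.symm)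
      | some q =>
        rw [hl] at h; simp only [pvUpd, Option.some.injEq] at h
        rcases min_choice b q with hm | hm
        · exact List.mem_cons.mpr (Or.inl (by rw [← h, hm]))
        · exact List.mem_cons_of_mem _ (ih p (by rw [hl, ← h, hm]))

theorem omin_le : ∀ (l : List (Option Int)) (p : Int), some p ∈ l → ∃ q, omin l = some q ∧ q ≤ p := by
  intro l
  induction l with
  | nil => intro p h; simp at h
  | cons a l ih =>
    intro p h
    rw [omin_cons]
    rcases List.mem_cons.mp h with h | h
    · subst h
      cases hl : omin l with
      | none => exact ⟨p, rfl, le_refl p⟩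
      | some q => exact ⟨min p q, rfl, min_le_left p q⟩
    · obtain ⟨q, hq, hle⟩ := ih p h
      rw [hq]
      cases a with
      | none => exact ⟨q, rfl, hle⟩
      | some b => exact ⟨min b q, rfl, le_trans (min_le_right b q) hle⟩

-- the ten branch conditions of A, named
def pvC0 (s : String) : Bool := pvGene.any (fun pattern => PySem.Str.isIn pattern s)
def pvC1 (s : String) : Bool := pvTrait.any (fun trait => PySem.Str.isIn trait (PySem.Str.lower s))
def pvC2 (s : String) : Bool := pvGenotype.contains s
def pvC3 (s : String) : Bool := PySem.Str.startswith s "q" && s.toList.any PySem.Chars.isdigit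
def pvC4 (s : String) : Bool := PySem.Str.isIn "chromosome" (PySem.Str.lower s)
def pvC5 (s : String) : Bool := PySem.Str.isIn "trial" (PySem.Str.lower s)
def pvC6 (s : String) : Bool := pvLocation.contains s
def pvC7 (s : String) : Bool := pvWeather.any (fun weather => PySem.Str.isIn weather (PySem.Str.lower s))
def pvC8 (s : String) : Bool := PySem.Str.startswith s "SNP_" || PySem.Str.startswith s "SSR_"
def pvC9 (s : String) : Bool := PySem.Str.isIn "pathway" (PySem.Str.lower s) || PySem.Str.isIn "signaling" (PySem.Str.lower s) || PySem.Str.isIn "biosynthesis" (PySem.Str.lower s) || PySem.Str.isIn "metabolism" (PySem.Str.lower s) || PySem.Str.isIn "response" (PySem.Str.lower s) || PySem.Str.isIn "clock" (PySem.Str.lower s) || PySem.Str.isIn "division" (PySem.Str.lower s)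

def pvC (s : String) (p : Int) : Bool :=
  if p = 0 then pvC0 s else if p = 1 then pvC1 s else if p = 2 then pvC2 s
  else if p = 3 then pvC3 s else if p = 4 then pvC4 s else if p = 5 then pvC5 s
  else if p = 6 then pvC6 s else if p = 7 then pvC7 s else if p = 8 then pvC8 s
  else if p = 9 then pvC9 s else false

-- A's chain as an Option Int (index of the first true condition)
def pvChain (s : String) : Option Int :=
  if pvC0 s then some 0 else if pvC1 s then some 1 else if pvC2 s then some 2
  else if pvC3 s then some 3 else if pvC4 s then some 4 else if pvC5 s then some 5
  else if pvC6 s then some 6 else if pvC7 s then some 7 else if pvC8 s then some 8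
  else if pvC9 s then some 9 else none

def pvLabelOf (o : Option Int) : String :=
  match o with
  | none => "Entity"
  | some p => pvLabels.getD p "Entity"

-- all priority contributions B's scan collects, flattened into one list
def pvContribs (s : String) : List (Option Int) :=
  (PySem.List.pyRange 0 (PySem.Str.len s) 1).flatMap (fun i =>
    pvCLens.map (fun L => pvCased.get? (PySem.Str.slice s (some i) (some (i + L)))) ++
    pvLLens.map (fun L => pvLower.get? (PySem.Str.slice (PySem.Str.lower s) (some i) (some (i + L)))))
  ++ [pvExact.get? s]
  ++ [if pvC3 s then some 3 else none]
  ++ [if pvC8 s then some 8 else none]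

theorem pvUpd_ite (b : Option Int) (c : Prop) [Decidable c] (v : Int) :
    (if c then pvUpd b (some v) else b) = pvUpd b (if c then some v else none) := by
  by_cases h : c <;> simp [h, pvUpd]


theorem pvLabelOf_none : pvLabelOf none = "Entity" := rfl
theorem pvLabelOf_0 : pvLabelOf (some 0) = "Gene" := rfl
theorem pvLabelOf_1 : pvLabelOf (some 1) = "Trait" := rfl
theorem pvLabelOf_2 : pvLabelOf (some 2) = "Genotype" := rfl
theorem pvLabelOf_3 : pvLabelOf (some 3) = "QTL" := rfl
theorem pvLabelOf_4 : pvLabelOf (some 4) = "Chromosome" := rfl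
theorem pvLabelOf_5 : pvLabelOf (some 5) = "Trial" := rfl
theorem pvLabelOf_6 : pvLabelOf (some 6) = "Location" := rfl
theorem pvLabelOf_7 : pvLabelOf (some 7) = "Weather" := rfl
theorem pvLabelOf_8 : pvLabelOf (some 8) = "Marker" := rfl
theorem pvLabelOf_9 : pvLabelOf (some 9) = "Pathway" := rfl

theorem A_eq (s : String) : determine_node_type s = pvLabelOf (pvChain s) := by
  simp only [pvChain, apply_ite pvLabelOf, pvLabelOf_none, pvLabelOf_0, pvLabelOf_1,
    pvLabelOf_2, pvLabelOf_3, pvLabelOf_4, pvLabelOf_5, pvLabelOf_6, pvLabelOf_7,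
    pvLabelOf_8, pvLabelOf_9]
  rfl

theorem B_eq (s : String) : determine_node_type_alt s = pvLabelOf (omin (pvContribs s)) := by
  unfold determine_node_type_alt pvContribs pvC3 pvC8
  simp only [pvUpd_ite]
  simp only [omin_append, omin_singleton, omin_flatMap, foldl_pvUpd_f, pvUpd_none_left,
    pvUpd_assoc]
  rfl

set_option maxRecDepth 100000 in
theorem factCasedItems : ∀ pr ∈ pvCased.items, pr.1 ∈ pvGene ∧ pr.2 = 0 := by decide
set_option maxRecDepth 100000 in
theorem factLowerItems : ∀ pr ∈ pvLower.items,
    (pr.2 = 1 ∧ pr.1 ∈ pvTrait) ∨ (pr.2 = 4 ∧ pr.1 = "chromosome") ∨ (pr.2 = 5 ∧ pr.1 = "trial") ∨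
    (pr.2 = 7 ∧ pr.1 ∈ pvWeather) ∨ (pr.2 = 9 ∧ pr.1 ∈ pvPathway) := by decide
set_option maxRecDepth 100000 in
theorem factExactItems : ∀ pr ∈ pvExact.items, (pr.2 = 2 ∧ pr.1 ∈ pvGenotype) ∨ (pr.2 = 6 ∧ pr.1 ∈ pvLocation) := by decide
set_option maxRecDepth 100000 in
theorem factGene : ∀ k ∈ pvGene, pvCased.get? k = some 0 ∧ (PySem.Str.len k : Int) ∈ pvCLens ∧ k.toList ≠ [] := by decide
set_option maxRecDepth 100000 in
theorem factTrait : ∀ k ∈ pvTrait, pvLower.get? k = some 1 ∧ (PySem.Str.len k : Int) ∈ pvLLens ∧ k.toList ≠ [] := by decide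
set_option maxRecDepth 100000 in
theorem factWeather : ∀ k ∈ pvWeather, (PySem.Str.len k : Int) ∈ pvLLens ∧ k.toList ≠ [] ∧ (k ≠ "rainfall" → pvLower.get? k = some 7) := by decide
set_option maxRecDepth 100000 in
theorem factPathway : ∀ k ∈ pvPathway, pvLower.get? k = some 9 ∧ (PySem.Str.len k : Int) ∈ pvLLens ∧ k.toList ≠ [] := by decide
set_option maxRecDepth 100000 in
theorem factGenotype : ∀ k ∈ pvGenotype, pvExact.get? k = some 2 := by decide
set_option maxRecDepth 100000 in
theorem factLocation : ∀ k ∈ pvLocation, pvExact.get? k = some 6 := by decide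
set_option maxRecDepth 100000 in
theorem factChromTrial : pvLower.get? "chromosome" = some 4 ∧ ((PySem.Str.len "chromosome" : Int) ∈ pvLLens ∧ ("chromosome" : String).toList ≠ []) ∧
    pvLower.get? "trial" = some 5 ∧ ((PySem.Str.len "trial" : Int) ∈ pvLLens ∧ ("trial" : String).toList ≠ []) := by decide
set_option maxRecDepth 100000 in
theorem factCLensNonneg : ∀ L ∈ pvCLens, 0 ≤ L := by decide
set_option maxRecDepth 100000 in
theorem factLLensNonneg : ∀ L ∈ pvLLens, 0 ≤ L := by decide
set_option maxRecDepth 100000 in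
theorem factRainfallTrait : ("rainfall" : String) ∈ pvTrait := by decide

theorem len_lower (s : String) : (PySem.Str.lower s).toList.length = s.toList.length := by
  simp [PySem.Str.toList_lower, PySem.Chars.lower]

theorem str_slice_toList (hay : String) (a b : Nat) :
    (PySem.Str.slice hay (some (a:Int)) (some ((a:Int)+(b:Int)))).toList = (hay.toList.drop a).take b := by
  simp [PySem.List.slice_natCast_add]

theorem isIn_of_toList_eq_slice (pat hay : String) (a b : Nat)
    (h : pat.toList = (hay.toList.drop a).take b) : PySem.Str.isIn pat hay = true := by
  rw [PySem.Str.isIn_eq]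
  exact (PySem.Chars.isIn_iff_infix _ _).mpr
    (h ▸ ((hay.toList.drop a).take_prefix b).isInfix.trans (hay.toList.drop_suffix a).isInfix)

theorem exists_slice_of_isIn (pat hay : String) (hne : pat.toList ≠ [])
    (h : PySem.Str.isIn pat hay = true) :
    ∃ a : Nat, a < hay.toList.length ∧ (hay.toList.drop a).take pat.toList.length = pat.toList := by
  rw [PySem.Str.isIn_eq] at h
  have hinf : pat.toList <:+: hay.toList := (PySem.Chars.isIn_iff_infix _ _).mp h
  obtain ⟨t, hpre, hsuf⟩ := List.infix_iff_prefix_suffix.mp hinf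
  have hdrop : t = hay.toList.drop (hay.toList.length - t.length) := List.suffix_iff_eq_drop.mp hsuf
  refine ⟨hay.toList.length - t.length, ?_, ?_⟩
  · have h1 : pat.toList.length ≤ t.length := hpre.length_le
    have h2 : t.length ≤ hay.toList.length := hsuf.length_le
    have h3 : 0 < pat.toList.length := List.length_pos_of_ne_nil hne
    omega
  · rw [← hdrop]
    exact (List.prefix_iff_eq_take.mp hpre).symm

theorem contrib_sub_cased (s pat : String) (p : Int) (hget : pvCased.get? pat = some p)
    (hlen : (PySem.Str.len pat : Int) ∈ pvCLens) (hne : pat.toList ≠ [])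
    (hin : PySem.Str.isIn pat s = true) : some p ∈ pvContribs s := by
  obtain ⟨a, ha, hsl⟩ := exists_slice_of_isIn pat s hne hin
  have hslice : PySem.Str.slice s (some (a:Int)) (some ((a:Int) + (PySem.Str.len pat : Int))) = pat := by
    apply String.toList_inj.mp
    have : PySem.Str.len pat = pat.toList.length := by simp
    rw [this, str_slice_toList, hsl]
  unfold pvContribs
  simp only [List.mem_append, List.mem_flatMap, List.mem_map, List.mem_singleton]
  refine Or.inl (Or.inl (Or.inl ⟨(a:Int), ?_, Or.inl ⟨(PySem.Str.len pat : Int), hlen, ?_⟩⟩))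
  · refine PySem.List.mem_pyRange_one.mpr ⟨by positivity, ?_⟩
    have : PySem.Str.len s = s.toList.length := by simp
    omega
  · rw [hslice, hget]

theorem contrib_sub_lower (s pat : String) (p : Int) (hget : pvLower.get? pat = some p)
    (hlen : (PySem.Str.len pat : Int) ∈ pvLLens) (hne : pat.toList ≠ [])
    (hin : PySem.Str.isIn pat (PySem.Str.lower s) = true) : some p ∈ pvContribs s := by
  obtain ⟨a, ha, hsl⟩ := exists_slice_of_isIn pat (PySem.Str.lower s) hne hin
  have hslice : PySem.Str.slice (PySem.Str.lower s) (some (a:Int)) (some ((a:Int) + (PySem.Str.len pat : Int))) = pat := by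
    apply String.toList_inj.mp
    have : PySem.Str.len pat = pat.toList.length := by simp
    rw [this, str_slice_toList, hsl]
  unfold pvContribs
  simp only [List.mem_append, List.mem_flatMap, List.mem_map, List.mem_singleton]
  refine Or.inl (Or.inl (Or.inl ⟨(a:Int), ?_, Or.inr ⟨(PySem.Str.len pat : Int), hlen, ?_⟩⟩))
  · refine PySem.List.mem_pyRange_one.mpr ⟨by positivity, ?_⟩
    have h1 : PySem.Str.len s = s.toList.length := by simp
    have h2 := len_lower s
    omega
  · rw [hslice, hget]

theorem contrib_exact (s : String) (p : Int) (hget : pvExact.get? s = some p) :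
    some p ∈ pvContribs s := by
  unfold pvContribs
  simp [hget]

set_option maxHeartbeats 2000000 in
theorem pvC_cases (s : String) (q : Int) (h : pvC s q = true) :
    (q = 0 ∧ pvC0 s) ∨ (q = 1 ∧ pvC1 s) ∨ (q = 2 ∧ pvC2 s) ∨ (q = 3 ∧ pvC3 s) ∨ (q = 4 ∧ pvC4 s) ∨
    (q = 5 ∧ pvC5 s) ∨ (q = 6 ∧ pvC6 s) ∨ (q = 7 ∧ pvC7 s) ∨ (q = 8 ∧ pvC8 s) ∨ (q = 9 ∧ pvC9 s) := by
  unfold pvC at h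
  split_ifs at h with e0 e1 e2 e3 e4 e5 e6 e7 e8 e9
  · exact Or.inl ⟨e0, h⟩
  · exact Or.inr (Or.inl ⟨e1, h⟩)
  · exact Or.inr (Or.inr (Or.inl ⟨e2, h⟩))
  · exact Or.inr (Or.inr (Or.inr (Or.inl ⟨e3, h⟩)))
  · exact Or.inr (Or.inr (Or.inr (Or.inr (Or.inl ⟨e4, h⟩))))
  · exact Or.inr (Or.inr (Or.inr (Or.inr (Or.inr (Or.inl ⟨e5, h⟩)))))
  · exact Or.inr (Or.inr (Or.inr (Or.inr (Or.inr (Or.inr (Or.inl ⟨e6, h⟩))))))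
  · exact Or.inr (Or.inr (Or.inr (Or.inr (Or.inr (Or.inr (Or.inr (Or.inl ⟨e7, h⟩)))))))
  · exact Or.inr (Or.inr (Or.inr (Or.inr (Or.inr (Or.inr (Or.inr (Or.inr (Or.inl ⟨e8, h⟩))))))))
  · exact Or.inr (Or.inr (Or.inr (Or.inr (Or.inr (Or.inr (Or.inr (Or.inr (Or.inr ⟨e9, h⟩))))))))

set_option maxHeartbeats 2000000 in
theorem chain_none (s : String) (h : pvChain s = none) : ∀ p, pvC s p = false := by
  intro p
  unfold pvChain at h
  split_ifs at h with h0 h1 h2 h3 h4 h5 h6 h7 h8 h9 <;> try simp at h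
  unfold pvC
  split_ifs
  · exact Bool.eq_false_iff.mpr h0
  · exact Bool.eq_false_iff.mpr h1
  · exact Bool.eq_false_iff.mpr h2
  · exact Bool.eq_false_iff.mpr h3
  · exact Bool.eq_false_iff.mpr h4
  · exact Bool.eq_false_iff.mpr h5
  · exact Bool.eq_false_iff.mpr h6
  · exact Bool.eq_false_iff.mpr h7
  · exact Bool.eq_false_iff.mpr h8
  · exact Bool.eq_false_iff.mpr h9
  · rfl

set_option maxHeartbeats 1000000 in
theorem chain_some (s : String) (p : Int) (h : pvChain s = some p) :
    pvC s p = true ∧ ∀ q, pvC s q = true → p ≤ q := by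
  unfold pvChain at h
  split_ifs at h with h0 h1 h2 h3 h4 h5 h6 h7 h8 h9 <;> try simp at h
  · subst h
    refine ⟨h0, ?_⟩
    intro q hcq
    rcases pvC_cases s q hcq with ⟨rfl, hc⟩|⟨rfl, hc⟩|⟨rfl, hc⟩|⟨rfl, hc⟩|⟨rfl, hc⟩|⟨rfl, hc⟩|⟨rfl, hc⟩|⟨rfl, hc⟩|⟨rfl, hc⟩|⟨rfl, hc⟩
    · omega
    · omega
    · omega
    · omega
    · omega
    · omega
    · omega
    · omega
    · omega
    · omega
  · subst h
    refine ⟨h1, ?_⟩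
    intro q hcq
    rcases pvC_cases s q hcq with ⟨rfl, hc⟩|⟨rfl, hc⟩|⟨rfl, hc⟩|⟨rfl, hc⟩|⟨rfl, hc⟩|⟨rfl, hc⟩|⟨rfl, hc⟩|⟨rfl, hc⟩|⟨rfl, hc⟩|⟨rfl, hc⟩
    · exact absurd hc h0
    · omega
    · omega
    · omega
    · omega
    · omega
    · omega
    · omega
    · omega
    · omega
  · subst h
    refine ⟨h2, ?_⟩
    intro q hcq
    rcases pvC_cases s q hcq with ⟨rfl, hc⟩|⟨rfl, hc⟩|⟨rfl, hc⟩|⟨rfl, hc⟩|⟨rfl, hc⟩|⟨rfl, hc⟩|⟨rfl, hc⟩|⟨rfl, hc⟩|⟨rfl, hc⟩|⟨rfl, hc⟩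
    · exact absurd hc h0
    · exact absurd hc h1
    · omega
    · omega
    · omega
    · omega
    · omega
    · omega
    · omega
    · omega
  · subst h
    refine ⟨h3, ?_⟩
    intro q hcq
    rcases pvC_cases s q hcq with ⟨rfl, hc⟩|⟨rfl, hc⟩|⟨rfl, hc⟩|⟨rfl, hc⟩|⟨rfl, hc⟩|⟨rfl, hc⟩|⟨rfl, hc⟩|⟨rfl, hc⟩|⟨rfl, hc⟩|⟨rfl, hc⟩
    · exact absurd hc h0
    · exact absurd hc h1
    · exact absurd hc h2
    · omega
    · omega
    · omega
    · omega
    · omega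
    · omega
    · omega
  · subst h
    refine ⟨h4, ?_⟩
    intro q hcq
    rcases pvC_cases s q hcq with ⟨rfl, hc⟩|⟨rfl, hc⟩|⟨rfl, hc⟩|⟨rfl, hc⟩|⟨rfl, hc⟩|⟨rfl, hc⟩|⟨rfl, hc⟩|⟨rfl, hc⟩|⟨rfl, hc⟩|⟨rfl, hc⟩
    · exact absurd hc h0
    · exact absurd hc h1
    · exact absurd hc h2
    · exact absurd hc h3
    · omega
    · omega
    · omega
    · omega
    · omega
    · omega
  · subst h
    refine ⟨h5, ?_⟩
    intro q hcq
    rcases pvC_cases s q hcq with ⟨rfl, hc⟩|⟨rfl, hc⟩|⟨rfl, hc⟩|⟨rfl, hc⟩|⟨rfl, hc⟩|⟨rfl, hc⟩|⟨rfl, hc⟩|⟨rfl, hc⟩|⟨rfl, hc⟩|⟨rfl, hc⟩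
    · exact absurd hc h0
    · exact absurd hc h1
    · exact absurd hc h2
    · exact absurd hc h3
    · exact absurd hc h4
    · omega
    · omega
    · omega
    · omega
    · omega
  · subst h
    refine ⟨h6, ?_⟩
    intro q hcq
    rcases pvC_cases s q hcq with ⟨rfl, hc⟩|⟨rfl, hc⟩|⟨rfl, hc⟩|⟨rfl, hc⟩|⟨rfl, hc⟩|⟨rfl, hc⟩|⟨rfl, hc⟩|⟨rfl, hc⟩|⟨rfl, hc⟩|⟨rfl, hc⟩
    · exact absurd hc h0
    · exact absurd hc h1
    · exact absurd hc h2
    · exact absurd hc h3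
    · exact absurd hc h4
    · exact absurd hc h5
    · omega
    · omega
    · omega
    · omega
  · subst h
    refine ⟨h7, ?_⟩
    intro q hcq
    rcases pvC_cases s q hcq with ⟨rfl, hc⟩|⟨rfl, hc⟩|⟨rfl, hc⟩|⟨rfl, hc⟩|⟨rfl, hc⟩|⟨rfl, hc⟩|⟨rfl, hc⟩|⟨rfl, hc⟩|⟨rfl, hc⟩|⟨rfl, hc⟩
    · exact absurd hc h0
    · exact absurd hc h1
    · exact absurd hc h2
    · exact absurd hc h3
    · exact absurd hc h4
    · exact absurd hc h5
    · exact absurd hc h6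
    · omega
    · omega
    · omega
  · subst h
    refine ⟨h8, ?_⟩
    intro q hcq
    rcases pvC_cases s q hcq with ⟨rfl, hc⟩|⟨rfl, hc⟩|⟨rfl, hc⟩|⟨rfl, hc⟩|⟨rfl, hc⟩|⟨rfl, hc⟩|⟨rfl, hc⟩|⟨rfl, hc⟩|⟨rfl, hc⟩|⟨rfl, hc⟩
    · exact absurd hc h0
    · exact absurd hc h1
    · exact absurd hc h2
    · exact absurd hc h3
    · exact absurd hc h4
    · exact absurd hc h5
    · exact absurd hc h6
    · exact absurd hc h7
    · omega
    · omega
  · subst h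
    refine ⟨h9, ?_⟩
    intro q hcq
    rcases pvC_cases s q hcq with ⟨rfl, hc⟩|⟨rfl, hc⟩|⟨rfl, hc⟩|⟨rfl, hc⟩|⟨rfl, hc⟩|⟨rfl, hc⟩|⟨rfl, hc⟩|⟨rfl, hc⟩|⟨rfl, hc⟩|⟨rfl, hc⟩
    · exact absurd hc h0
    · exact absurd hc h1
    · exact absurd hc h2
    · exact absurd hc h3
    · exact absurd hc h4
    · exact absurd hc h5
    · exact absurd hc h6
    · exact absurd hc h7
    · exact absurd hc h8
    · omega

set_option maxHeartbeats 2000000 in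
theorem C1 (s : String) (o : Option Int) (ho : o ∈ pvContribs s) (p : Int) (hp : o = some p) :
    pvC s p = true := by
  subst hp
  unfold pvContribs at ho
  simp only [List.mem_append, List.mem_flatMap, List.mem_map, List.mem_singleton] at ho
  rcases ho with ((⟨i, hi, hcl⟩ | he) | hq) | hm
  · have h0i : 0 ≤ i := (PySem.List.mem_pyRange_one.mp hi).1
    obtain ⟨a, rfl⟩ : ∃ a : Nat, (a : Int) = i := ⟨i.toNat, Int.toNat_of_nonneg h0i⟩
    rcases hcl with ⟨L, hL, hget⟩ | ⟨L, hL, hget⟩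
    · have h0L : 0 ≤ L := factCLensNonneg L hL
      obtain ⟨b, rfl⟩ : ∃ b : Nat, (b : Int) = L := ⟨L.toNat, Int.toNat_of_nonneg h0L⟩
      have hkey := PySem.Dict.mem_items_of_get?_eq_some _ hget
      obtain ⟨hmem, hp0⟩ := factCasedItems _ hkey
      simp only at hmem hp0
      subst hp0
      show pvC0 s = true
      exact List.any_eq_true.mpr ⟨_, hmem,
        isIn_of_toList_eq_slice _ s a b (str_slice_toList s a b)⟩
    · have h0L : 0 ≤ L := factLLensNonneg L hL
      obtain ⟨b, rfl⟩ : ∃ b : Nat, (b : Int) = L := ⟨L.toNat, Int.toNat_of_nonneg h0L⟩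
      have hkey := PySem.Dict.mem_items_of_get?_eq_some _ hget
      have hin := isIn_of_toList_eq_slice _ (PySem.Str.lower s) a b (str_slice_toList (PySem.Str.lower s) a b)
      rcases factLowerItems _ hkey with ⟨hp', hmem⟩ | ⟨hp', hmem⟩ | ⟨hp', hmem⟩ | ⟨hp', hmem⟩ | ⟨hp', hmem⟩ <;>
        simp only at hp' hmem <;> subst hp'
      · show pvC1 s = true
        exact List.any_eq_true.mpr ⟨_, hmem, hin⟩
      · show PySem.Str.isIn "chromosome" (PySem.Str.lower s) = true
        exact hmem ▸ hin
      · show PySem.Str.isIn "trial" (PySem.Str.lower s) = true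
        exact hmem ▸ hin
      · show pvC7 s = true
        exact List.any_eq_true.mpr ⟨_, hmem, hin⟩
      · show pvC9 s = true
        simp only [pvPathway, List.mem_cons, List.not_mem_nil, or_false] at hmem
        unfold pvC9
        rcases hmem with h | h | h | h | h | h | h <;> rw [h] at hin <;>
          simp only [hin, Bool.or_true, Bool.true_or]
  · have hkey := PySem.Dict.mem_items_of_get?_eq_some _ he.symm
    rcases factExactItems _ hkey with ⟨hp', hmem⟩ | ⟨hp', hmem⟩ <;>
      simp only at hp' hmem <;> subst hp'
    · show pvC2 s = true
      exact List.elem_eq_true_of_mem hmem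
    · show pvC6 s = true
      exact List.elem_eq_true_of_mem hmem
  · split_ifs at hq with h
    injection hq with hq'
    subst hq'
    exact h
  · split_ifs at hm with h
    injection hm with hm'
    subst hm'
    exact h

set_option maxHeartbeats 2000000 in
theorem C2 (s : String) (p : Int) (hc : pvC s p = true) (hmin : ∀ q, pvC s q = true → p ≤ q) :
    some p ∈ pvContribs s := by
  rcases pvC_cases s p hc with ⟨rfl, h⟩ | ⟨rfl, h⟩ | ⟨rfl, h⟩ | ⟨rfl, h⟩ | ⟨rfl, h⟩ | ⟨rfl, h⟩ | ⟨rfl, h⟩ | ⟨rfl, h⟩ | ⟨rfl, h⟩ | ⟨rfl, h⟩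
  · obtain ⟨pat, hmem, hin⟩ := List.any_eq_true.mp h
    obtain ⟨hget, hlen, hne⟩ := factGene pat hmem
    exact contrib_sub_cased s pat 0 hget hlen hne hin
  · obtain ⟨pat, hmem, hin⟩ := List.any_eq_true.mp h
    obtain ⟨hget, hlen, hne⟩ := factTrait pat hmem
    exact contrib_sub_lower s pat 1 hget hlen hne hin
  · refine contrib_exact s 2 (factGenotype s (List.mem_of_elem_eq_true h))
  · unfold pvContribs
    simp [h]
  · obtain ⟨hget, ⟨hlen, hne⟩, _⟩ := factChromTrial
    exact contrib_sub_lower s "chromosome" 4 hget hlen hne h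
  · obtain ⟨_, _, hget, hlen, hne⟩ := factChromTrial
    exact contrib_sub_lower s "trial" 5 hget hlen hne h
  · refine contrib_exact s 6 (factLocation s (List.mem_of_elem_eq_true h))
  · obtain ⟨pat, hmem, hin⟩ := List.any_eq_true.mp h
    obtain ⟨hlen, hne, hget⟩ := factWeather pat hmem
    have hpat : pat ≠ "rainfall" := by
      intro hr
      subst hr
      have h1 : pvC s 1 = true := by
        show pvC1 s = true
        exact List.any_eq_true.mpr ⟨_, factRainfallTrait, hin⟩
      have := hmin 1 h1
      omega
    exact contrib_sub_lower s pat 7 (hget hpat) hlen hne hin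
  · unfold pvContribs
    simp [h]
  · unfold pvC9 at h
    have hchoice : ∃ pat ∈ pvPathway, PySem.Str.isIn pat (PySem.Str.lower s) = true := by
      simp only [Bool.or_eq_true] at h
      rcases h with ((((((h|h)|h)|h)|h)|h)|h)
      exacts [⟨"pathway", by decide, h⟩, ⟨"signaling", by decide, h⟩, ⟨"biosynthesis", by decide, h⟩,
        ⟨"metabolism", by decide, h⟩, ⟨"response", by decide, h⟩, ⟨"clock", by decide, h⟩,
        ⟨"division", by decide, h⟩]
    obtain ⟨pat, hmem, hin⟩ := hchoice
    obtain ⟨hget, hlen, hne⟩ := factPathway pat hmem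
    exact contrib_sub_lower s pat 9 hget hlen hne hin

theorem omin_contribs_eq_chain (s : String) : omin (pvContribs s) = pvChain s := by
  cases h : pvChain s with
  | none =>
    cases ho : omin (pvContribs s) with
    | none => rfl
    | some p =>
      have hc := C1 s _ (omin_mem _ _ ho) p rfl
      rw [chain_none s h p] at hc
      exact absurd hc (by simp)
  | some p =>
    obtain ⟨hc, hmin⟩ := chain_some s p h
    obtain ⟨q, hq, hle⟩ := omin_le _ _ (C2 s p hc hmin)
    have hcq := C1 s _ (omin_mem _ _ hq) q rfl
    have hqp : q = p := le_antisymm hle (hmin q hcq)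
    rw [hq, hqp]

-- ===== VERDICT (by name: the statement is the Claim_ definition above) =====
theorem determine_node_type_spec : Claim_equal_determine_node_type := by
  intro s _
  show determine_node_type s = determine_node_type_alt s
  rw [A_eq, B_eq, omin_contribs_eq_chain]
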